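-- pv_equiv track=rewrite | github.com/AdvaitMhalungekar/BajajHackrx | llm_reasoner.py | batch_queries
-- ===== SOURCE A (Python) =====
-- BATCH_QUERY_OVERHEAD = 120
--
-- BATCH_TOKEN_LIMIT = 4000
--
-- def batch_queries(queries, context):
--
--
--
--     """Group queries so total tokens (context + queries) stay under BATCH_TOKEN_LIMIT."""
--
--     batches = []
--
--     current_batch = []
--
--     context_tokens = len(" ".join(context).split())
--
--     for q in queries:
--
--         est_tokens = context_tokens + (len(current_batch) + 1) * BATCH_QUERY_OVERHEAD
--
--         if est_tokens > BATCH_TOKEN_LIMIT and current_batch: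
--
--             batches.append(current_batch)
--
--             current_batch = [q]
--
--         else:
--
--             current_batch.append(q)
--
--     if current_batch:
--
--         batches.append(current_batch)
--
--     return batches
-- ===== SOURCE B (Python) =====
-- BATCH_QUERY_OVERHEAD = 120
--
-- BATCH_TOKEN_LIMIT = 4000
--
-- def batch_queries(queries, context):
--     """Group queries so total tokens (context + queries) stay under BATCH_TOKEN_LIMIT.
--
--     Since the per-query overhead is constant, every batch except the last has the
--     same fixed size, so compute that capacity once and chunk the list uniformly.
--     """
--     context_tokens = len(" ".join(context).split())
--     size = max(1, (BATCH_TOKEN_LIMIT - context_tokens) // BATCH_QUERY_OVERHEAD)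
--     batches = []
--     i = 0
--     while i < len(queries):
--         batches.append(queries[i:i + size])
--         i += size
--     return batches
-- ===== Notes on version B (the rewrite author's own statement) =====
-- stated objective: simpler
-- what changed: Replaced the greedy accumulate-and-flush loop with a closed-form batch capacity max(1,(LIMIT-context_tokens)//OVERHEAD) followed by uniform chunking of the query list.
import Mathlib
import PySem

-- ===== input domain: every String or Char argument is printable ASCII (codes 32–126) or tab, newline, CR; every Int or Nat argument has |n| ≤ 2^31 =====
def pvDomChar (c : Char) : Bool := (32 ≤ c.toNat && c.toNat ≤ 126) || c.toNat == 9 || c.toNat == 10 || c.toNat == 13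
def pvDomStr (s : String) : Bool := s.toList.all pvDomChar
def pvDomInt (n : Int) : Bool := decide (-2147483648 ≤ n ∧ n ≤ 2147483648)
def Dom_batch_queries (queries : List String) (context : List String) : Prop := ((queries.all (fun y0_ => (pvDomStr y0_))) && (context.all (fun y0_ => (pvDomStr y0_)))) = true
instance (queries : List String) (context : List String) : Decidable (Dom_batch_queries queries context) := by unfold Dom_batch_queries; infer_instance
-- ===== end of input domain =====

-- B replaces A's greedy accumulate-and-flush loop by a closed-form batch capacity plus
-- uniform index-based chunking (objective: simpler; same asymptotic cost).

-- ===== PORT A =====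
-- literal transliteration of A's for-loop: state (batches, current_batch)
def batch_queries (queries : List String) (context : List String) : List (List String) :=
  let context_tokens : Int := (PySem.Str.split₀ (PySem.Str.join " " context)).length
  let res := queries.foldl
    (fun (st : List (List String) × List String) q =>
      let est_tokens : Int := context_tokens + ((st.2.length : Int) + 1) * 120
      if est_tokens > 4000 ∧ st.2 ≠ [] then (st.1 ++ [st.2], [q])
      else (st.1, st.2 ++ [q]))
    ([], [])
  if res.2 ≠ [] then res.1 ++ [res.2] else res.1

-- ===== PORT B =====
-- Source B's while loop: each round appends queries[i:i+size] and advances i by size;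
-- `s` stands for size - 1 (size = max(1, …) is always ≥ 1), so the step is s + 1
def bq_loop (s : Nat) (qs : List String) (i : Nat) : List (List String) :=
  if i < qs.length then
    PySem.List.slice qs (some (i : Int)) (some ((i : Int) + ((s : Int) + 1)))
      :: bq_loop s qs (i + (s + 1))
  else []
  termination_by qs.length - i

def batch_queries_alt (queries : List String) (context : List String) : List (List String) :=
  let context_tokens : Int := (PySem.Str.split₀ (PySem.Str.join " " context)).length
  let size : Int := max 1 (PySem.Int.floordiv (4000 - context_tokens) 120)
  bq_loop (size.toNat - 1) queries 0

-- ===== PRECONDITION & SPEC =====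
def Spec_batch_queries (queries : List String) (context : List String) (out : List (List String)) : Prop := out = batch_queries_alt queries context
instance (queries : List String) (context : List String) (out : List (List String)) : Decidable (Spec_batch_queries queries context out) := by unfold Spec_batch_queries; infer_instance

-- ===== CLAIM (what is proved, stated in full; the proofs are below) =====
def Claim_equal_batch_queries : Prop := ∀ (queries : List String) (context : List String), Dom_batch_queries queries context → Spec_batch_queries queries context (batch_queries queries context)

-- ===== LEMMAS AND PROOFS =====

-- A's loop step, abstracted over the (constant) context token count
def bq_step (ctx : Int) (st : List (List String) × List String) (q : String) :
    List (List String) × List String :=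
  let est_tokens : Int := ctx + ((st.2.length : Int) + 1) * 120
  if est_tokens > 4000 ∧ st.2 ≠ [] then (st.1 ++ [st.2], [q])
  else (st.1, st.2 ++ [q])

-- A's final flush
def bq_finish (st : List (List String) × List String) : List (List String) :=
  if st.2 ≠ [] then st.1 ++ [st.2] else st.1

-- proof-side normal form: chunks of size s + 1, take/drop style
def bq_chunk (s : Nat) : List String → List (List String)
  | [] => []
  | x :: xs => (x :: xs.take s) :: bq_chunk s (xs.drop s)
  termination_by l => l.length
  decreasing_by simp [List.length_drop]

lemma bq_chunk_nil (s : Nat) : bq_chunk s [] = [] := by unfold bq_chunk; rfl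

lemma bq_chunk_cons (s : Nat) (x : String) (xs : List String) :
    bq_chunk s (x :: xs) = (x :: xs.take s) :: bq_chunk s (xs.drop s) := by
  conv_lhs => rw [bq_chunk.eq_def]

-- B's index loop produces the take/drop chunks of the not-yet-visited suffix
lemma bq_loop_eq (s : Nat) (qs : List String) (i : Nat) :
    bq_loop s qs i = bq_chunk s (qs.drop i) := by
  by_cases h : i < qs.length
  · rw [bq_loop, if_pos h, bq_loop_eq s qs (i + (s + 1))]
    have hcast : ((i : Int) + ((s : Int) + 1)) = ((i : Int) + ((s + 1 : Nat) : Int)) := by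
      push_cast; ring
    rw [hcast, PySem.List.slice_natCast_add]
    have hd : qs.drop i = qs[i] :: qs.drop (i + 1) := List.drop_eq_getElem_cons h
    rw [hd, bq_chunk_cons, List.take_succ_cons]
    have : (qs.drop (i + 1)).drop s = qs.drop (i + (s + 1)) := by
      rw [List.drop_drop]; ring_nf
    rw [this]
  · rw [bq_loop, if_neg h, List.drop_of_length_le (by omega), bq_chunk_nil]
  termination_by qs.length - i

-- main loop invariant: once current is nonempty and not over capacity, the greedy
-- loop produces exactly the uniform chunks of current ++ rest
lemma bq_key (ctx : Int) (s : Nat)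
    (H : ∀ n : Nat, 1 ≤ n → n ≤ s + 1 → ((ctx + ((n : Int) + 1) * 120 > 4000) ↔ n = s + 1)) :
    ∀ (l : List String) (b : List (List String)) (cur : List String),
      cur ≠ [] → cur.length ≤ s + 1 →
      bq_finish (l.foldl (bq_step ctx) (b, cur)) = b ++ bq_chunk s (cur ++ l) := by
  intro l
  induction l with
  | nil =>
    intro b cur hne hlen
    obtain ⟨x, xs, rfl⟩ := List.exists_cons_of_ne_nil hne
    rw [List.foldl_nil, List.append_nil, bq_chunk_cons,
      List.take_of_length_le (by simpa using hlen),
      List.drop_of_length_le (by simpa using hlen), bq_chunk_nil]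
    simp [bq_finish]
  | cons q rest ih =>
    intro b cur hne hlen
    obtain ⟨x, xs, rfl⟩ := List.exists_cons_of_ne_nil hne
    have hn1 : 1 ≤ (x :: xs).length := by simp
    by_cases hfull : (x :: xs).length = s + 1
    · have hcond : ctx + (((x :: xs).length : Int) + 1) * 120 > 4000 :=
        (H _ hn1 hlen).mpr hfull
      have hcond' : 4000 < ctx + ((xs.length : Int) + 1 + 1) * 120 := by
        simp only [List.length_cons] at hcond; push_cast at hcond; linarith
      have hxs : xs.length = s := by simpa using hfull
      have hstep : bq_step ctx (b, x :: xs) q = (b ++ [x :: xs], [q]) := by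
        simp [bq_step, hcond']
      have h1 : List.take s (xs ++ q :: rest) = xs := by
        rw [← hxs]; exact List.take_left
      have h2 : List.drop s (xs ++ q :: rest) = q :: rest := by
        rw [← hxs]; exact List.drop_left
      have hch : bq_chunk s ((x :: xs) ++ q :: rest) = (x :: xs) :: bq_chunk s (q :: rest) := by
        rw [List.cons_append, bq_chunk_cons, h1, h2]
      rw [List.foldl_cons, hstep, ih (b ++ [x :: xs]) [q] (by simp) (by simp), hch]
      simp
    · have hcond : ¬ (ctx + (((x :: xs).length : Int) + 1) * 120 > 4000) := by
        intro hc; exact hfull ((H _ hn1 hlen).mp hc)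
      have hcond' : ¬ (4000 < ctx + ((xs.length : Int) + 1 + 1) * 120) := by
        simp only [List.length_cons] at hcond; push_cast at hcond
        intro h; exact hcond (by linarith)
      have hstep : bq_step ctx (b, x :: xs) q = (b, (x :: xs) ++ [q]) := by
        simp [bq_step, hcond']
      have hlt : (x :: xs).length < s + 1 := Nat.lt_of_le_of_ne hlen hfull
      rw [List.foldl_cons, hstep, ih b ((x :: xs) ++ [q]) (by simp)
        (by simp only [List.length_append, List.length_cons, List.length_nil] at hlt ⊢; omega)]
      simp

lemma bq_main (ctx : Int) (queries : List String) :
    bq_finish (queries.foldl (bq_step ctx) ([], [])) =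
    bq_loop ((max 1 (PySem.Int.floordiv (4000 - ctx) 120)).toNat - 1) queries 0 := by
  have hfd : PySem.Int.floordiv (4000 - ctx) 120 = (4000 - ctx) / 120 :=
    PySem.Int.floordiv_eq_ediv_of_pos (by norm_num)
  rw [bq_loop_eq, List.drop_zero, hfd]
  set s : Nat := (max 1 ((4000 - ctx) / 120)).toNat - 1 with hs
  -- characterize capacity: flush happens exactly when current has size s + 1
  have H : ∀ n : Nat, 1 ≤ n → n ≤ s + 1 → ((ctx + ((n : Int) + 1) * 120 > 4000) ↔ n = s + 1) := by
    intro n h1 h2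
    rw [hs] at h2 ⊢
    omega
  cases queries with
  | nil => simp [bq_finish, bq_chunk_nil]
  | cons q rest =>
    have hfirst : bq_step ctx (([] : List (List String)), ([] : List String)) q = ([], [q]) := by
      simp [bq_step]
    rw [List.foldl_cons, hfirst, bq_key ctx s H rest [] [q] (by simp) (by simp)]
    simp

-- ===== VERDICT (by name: the statement is the Claim_ definition above) =====
theorem batch_queries_spec : Claim_equal_batch_queries := by
  intro queries context _
  exact bq_main ((PySem.Str.split₀ (PySem.Str.join " " context)).length : Int) queries
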